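-- pv_equiv track=rewrite | github.com/kalininalab/rinminer | analyze-results/analyze-graphs.py | _residue_selector
-- ===== SOURCE A (Python) =====
-- def _residue_selector(pdb_id, residues):
--     residues_selectors = []
--     current_chain = None
--     for chain, res_id, icode in residues:
--         if chain != current_chain:
--             residues_selector = "{0} and chain {1} and resi {2}{3}".format(pdb_id, chain, res_id, icode)
--             residues_selectors.append(residues_selector)
--             current_chain = chain
--             continue
--         residues_selector = residues_selector + "+{}{}".format(res_id, icode)
--         residues_selectors[-1] = residues_selector
--     residues_selector_string = " or ".join(residues_selectors)
--     return residues_selector_string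
-- ===== SOURCE B (Python) =====
-- def _residue_selector(pdb_id, residues):
--     # Run-based: split into maximal consecutive same-chain runs, render each run.
--     parts = []
--     i, n = 0, len(residues)
--     while i < n:
--         chain, res_id, icode = residues[i]
--         j = i + 1
--         while j < n and residues[j][0] == chain:
--             j += 1
--         sel = "{0} and chain {1} and resi {2}{3}".format(pdb_id, chain, res_id, icode)
--         for _, r, ic in residues[i + 1:j]:
--             sel += "+{}{}".format(r, ic)
--         parts.append(sel)
--         i = j
--     return " or ".join(parts)
-- ===== Notes on version B (the rewrite author's own statement) =====
-- stated objective: alternative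
-- what changed: Replaces A's single-pass state machine (current_chain tracking plus rewriting selectors[-1] in place) with a run-based decomposition: scan out each maximal consecutive same-chain run, render each run independently, then join.
import Mathlib
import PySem

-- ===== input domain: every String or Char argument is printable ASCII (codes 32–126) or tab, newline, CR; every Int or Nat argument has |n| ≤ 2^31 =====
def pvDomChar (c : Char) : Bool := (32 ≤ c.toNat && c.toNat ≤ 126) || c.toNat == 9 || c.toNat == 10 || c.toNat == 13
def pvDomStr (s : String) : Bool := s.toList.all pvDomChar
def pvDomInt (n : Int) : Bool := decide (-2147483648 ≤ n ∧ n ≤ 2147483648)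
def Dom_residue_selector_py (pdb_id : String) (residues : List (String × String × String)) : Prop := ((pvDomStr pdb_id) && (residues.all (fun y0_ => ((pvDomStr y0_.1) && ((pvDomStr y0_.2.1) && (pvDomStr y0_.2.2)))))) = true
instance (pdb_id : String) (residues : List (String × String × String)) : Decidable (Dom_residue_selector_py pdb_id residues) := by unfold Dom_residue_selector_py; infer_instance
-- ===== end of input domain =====

-- B replaces A's current_chain state machine (rewriting selectors[-1]) with a run-based
-- decomposition (maximal consecutive same-chain runs rendered independently); equal cost.

-- "{0} and chain {1} and resi {2}{3}".format(...) on string arguments = concatenation (exact)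
def pvFmtHead (pdb chain res icode : String) : String :=
  pdb ++ " and chain " ++ chain ++ " and resi " ++ res ++ icode

-- "+{}{}".format(res, icode) on string arguments = concatenation (exact)
def pvFmtPlus (res icode : String) : String := "+" ++ res ++ icode

-- ===== PORT A =====
-- A's loop state: (residues_selectors, current_chain, residues_selector).
-- `residues_selectors[-1] = s` is ported as dropLast ++ [s]; the else branch is only
-- reached with current_chain = some _, hence with a nonempty selector list, so this is exact.
def pvALoop (pdb : String) : List (String × String × String) → List String → Option String → String → List String
  | [], sels, _, _ => sels
  | (chain, res, icode) :: rest, sels, cur, acc =>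
    if some chain ≠ cur then
      pvALoop pdb rest (sels ++ [pvFmtHead pdb chain res icode]) (some chain) (pvFmtHead pdb chain res icode)
    else
      pvALoop pdb rest (sels.dropLast ++ [acc ++ pvFmtPlus res icode]) cur (acc ++ pvFmtPlus res icode)

def residue_selector_py (pdb_id : String) (residues : List (String × String × String)) : String :=
  PySem.Str.join " or " (pvALoop pdb_id residues [] none "")

-- ===== PORT B =====
-- Source B's outer while loop: split off the maximal consecutive run sharing the head's chain
-- (the inner `while j < n and residues[j][0] == chain` scan = takeWhile/dropWhile of the tail).
def pvRuns : List (String × String × String) → List (List (String × String × String))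
  | [] => []
  | x :: xs =>
      (x :: xs.takeWhile (fun y => y.1 == x.1)) :: pvRuns (xs.dropWhile (fun y => y.1 == x.1))
  termination_by l => l.length
  decreasing_by
    simp only [List.length_cons]
    exact Nat.lt_succ_of_le (List.length_dropWhile_le _ _)

-- Source B's run rendering: head selector, then `sel += "+{}{}"...` over the rest of the run
def pvRenderRun (pdb : String) : List (String × String × String) → String
  | [] => ""  -- unreachable: pvRuns produces only nonempty runs
  | (chain, res, icode) :: rest =>
      rest.foldl (fun acc y => acc ++ pvFmtPlus y.2.1 y.2.2) (pvFmtHead pdb chain res icode)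

def residue_selector_py_alt (pdb_id : String) (residues : List (String × String × String)) : String :=
  PySem.Str.join " or " ((pvRuns residues).map (pvRenderRun pdb_id))

-- ===== PRECONDITION & SPEC =====
def Spec_residue_selector_py (pdb_id : String) (residues : List (String × String × String)) (out : String) : Prop := out = residue_selector_py_alt pdb_id residues
instance (pdb_id : String) (residues : List (String × String × String)) (out : String) : Decidable (Spec_residue_selector_py pdb_id residues out) := by unfold Spec_residue_selector_py; infer_instance

-- ===== CLAIM (what is proved, stated in full; the proofs are below) =====
def Claim_equal_residue_selector_py : Prop := ∀ (pdb_id : String) (residues : List (String × String × String)), Dom_residue_selector_py pdb_id residues → Spec_residue_selector_py pdb_id residues (residue_selector_py pdb_id residues)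

-- ===== LEMMAS AND PROOFS =====

-- Invariant: once a run has started (cur = some c, selector list = done ++ [acc]), A's loop
-- finishes the current run by folding over takeWhile and then processes the remaining runs.
theorem pvALoop_run (pdb : String) (xs : List (String × String × String)) :
    ∀ (done : List String) (acc c : String),
    pvALoop pdb xs (done ++ [acc]) (some c) acc =
      done ++ [(xs.takeWhile (fun y => y.1 == c)).foldl
                 (fun a y => a ++ pvFmtPlus y.2.1 y.2.2) acc]
           ++ (pvRuns (xs.dropWhile (fun y => y.1 == c))).map (pvRenderRun pdb) := by
  induction xs with
  | nil => intro done acc c; simp [pvALoop, pvRuns]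
  | cons x rest ih =>
    intro done acc c
    obtain ⟨chain, res, icode⟩ := x
    by_cases h : chain = c
    · subst h
      have h1 : pvALoop pdb ((chain, res, icode) :: rest) (done ++ [acc]) (some chain) acc
          = pvALoop pdb rest (done ++ [acc ++ pvFmtPlus res icode]) (some chain)
              (acc ++ pvFmtPlus res icode) := by
        simp [pvALoop]
      rw [h1, ih done (acc ++ pvFmtPlus res icode) chain]
      simp
    · have hb : (chain == c) = false := by simpa using h
      have h1 : pvALoop pdb ((chain, res, icode) :: rest) (done ++ [acc]) (some c) acc
          = pvALoop pdb rest ((done ++ [acc]) ++ [pvFmtHead pdb chain res icode]) (some chain)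
              (pvFmtHead pdb chain res icode) := by
        simp [pvALoop, h]
      rw [h1, ih (done ++ [acc]) (pvFmtHead pdb chain res icode) chain]
      simp [hb, pvRuns, pvRenderRun]

theorem pvALoop_eq (pdb : String) (residues : List (String × String × String)) :
    pvALoop pdb residues [] none "" = (pvRuns residues).map (pvRenderRun pdb) := by
  cases residues with
  | nil => simp [pvALoop, pvRuns]
  | cons x rest =>
    obtain ⟨chain, res, icode⟩ := x
    simp only [pvALoop]
    rw [if_pos (by simp)]
    have := pvALoop_run pdb rest [] (pvFmtHead pdb chain res icode) chain
    simpa [pvRuns, pvRenderRun] using this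

-- ===== VERDICT (by name: the statement is the Claim_ definition above) =====
theorem residue_selector_py_spec : Claim_equal_residue_selector_py := by
  intro pdb residues _
  unfold Spec_residue_selector_py residue_selector_py residue_selector_py_alt
  rw [pvALoop_eq]
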